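-- pv_equiv track=rewrite | github.com/LSDOlab/python_csdl_backend | python_csdl_backend/operations/einsum.py | new_einsum_subscripts_to_string_and_list
-- ===== SOURCE A (Python) =====
-- from typing import List, Union, Tuple
--
-- def new_einsum_subscripts_to_string_and_list(subscripts: List[Tuple], scalar_output=False):
--     # Assign characters to each axis_name in the tuples
--     unused_chars = 'abcdefghijklmnopqrstuvwxyz'
--     axis_map = {}
--     operation_as_string = ''
--     operation_aslist = []
--
--     if not(scalar_output):
--         num_inputs = len(subscripts) - 1
--     else:
--         num_inputs = len(subscripts)
--
--     for axis_names in subscripts[:num_inputs]: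
--         tensor_rep = ''
--
--         # Mapping an alphabet for each axis in the tuple
--         for axis in axis_names:
--             if not (axis in axis_map):
--                 axis_map[axis] = unused_chars[0]
--                 unused_chars = unused_chars[1:]
--             tensor_rep += axis_map[axis]
--
--         operation_as_string += tensor_rep
--         operation_as_string += ','
--         operation_aslist.append(tensor_rep)
--
--     tensor_rep = ''
--
--     # When output is a tensor
--     if len(subscripts) == (num_inputs + 1):
--         for axis in subscripts[-1]:
--             tensor_rep += axis_map[axis]
--
--     operation_as_string = operation_as_string[:-1] + '->'
--     operation_as_string += tensor_rep
--     operation_aslist.append(tensor_rep)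
--
--     return operation_aslist, operation_as_string
-- ===== SOURCE B (Python) =====
-- def new_einsum_subscripts_to_string_and_list(subscripts, scalar_output=False):
--     # Table-free: an axis's letter is fully determined by the flattened input axes —
--     # it is letters[d] where d = number of distinct axes occurring strictly before
--     # the axis's own first occurrence. Each cell recomputes its letter by that rule.
--     letters = 'abcdefghijklmnopqrstuvwxyz'
--     inputs = subscripts if scalar_output else subscripts[:-1]
--     flat = [axis for axis_names in inputs for axis in axis_names]
--
--     def letter(axis):
--         return letters[len(set(flat[:flat.index(axis)]))]
--
--     reps = [''.join(letter(a) for a in axis_names) for axis_names in inputs]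
--     out_rep = '' if scalar_output else ''.join(letter(a) for a in subscripts[-1])
--     return reps + [out_rep], ','.join(reps) + '->' + out_rep
-- ===== Notes on version B (the rewrite author's own statement) =====
-- stated objective: alternative
-- what changed: A assigns letters in one stateful pass, growing a dict and consuming a letter string while concatenating the result; B keeps no table at all: every cell's letter is recomputed independently as letters[#distinct axes before the axis's first occurrence in the flattened inputs] via index() and a set, then the result is assembled by joins.
import Mathlib
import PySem

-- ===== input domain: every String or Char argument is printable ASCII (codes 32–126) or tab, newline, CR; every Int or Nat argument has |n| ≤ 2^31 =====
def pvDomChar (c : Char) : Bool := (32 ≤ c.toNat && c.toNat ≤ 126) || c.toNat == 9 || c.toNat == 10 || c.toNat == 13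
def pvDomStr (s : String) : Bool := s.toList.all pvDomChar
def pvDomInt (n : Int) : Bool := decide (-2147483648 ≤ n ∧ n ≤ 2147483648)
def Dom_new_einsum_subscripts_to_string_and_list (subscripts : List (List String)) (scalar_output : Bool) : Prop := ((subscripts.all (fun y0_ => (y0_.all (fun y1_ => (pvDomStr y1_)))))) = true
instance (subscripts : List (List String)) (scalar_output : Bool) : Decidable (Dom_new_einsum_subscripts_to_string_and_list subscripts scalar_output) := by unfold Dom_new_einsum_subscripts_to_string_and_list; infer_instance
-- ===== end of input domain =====

-- B replaces A's stateful pass (growing dict + consumed letter string + incremental concatenation)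
-- by a table-free rule: each cell's letter is recomputed independently as
-- letters[# distinct axes before the axis's first occurrence in the flattened inputs];
-- same return value, objective: alternative algorithm (no table, nested scans).


-- ===== PORT A =====
-- strings are ported as List Char (PySem convention) and converted with String.ofList at the end
def pvLetters : List Char := "abcdefghijklmnopqrstuvwxyz".toList

-- body of A's inner loop 'for axis in axis_names'; state = (axis_map, unused_chars, tensor_rep)
-- 'unused_chars[0]' raises IndexError when the letters are exhausted — excluded by Pre_; 'take 1' is [] there
def pvAInner (st : PySem.Dict String (List Char) × List Char × List Char) (axis : String) :
    PySem.Dict String (List Char) × List Char × List Char :=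
  match st with
  | (m, unused, rep) =>
    match PySem.Dict.get? m axis with
    | some c => (m, unused, rep ++ c)
    | none => (PySem.Dict.insert m axis (unused.take 1), unused.drop 1, rep ++ unused.take 1)

-- body of A's outer loop 'for axis_names in subscripts[:num_inputs]'
def pvAOuter (st : PySem.Dict String (List Char) × List Char × List Char × List String)
    (axis_names : List String) :
    PySem.Dict String (List Char) × List Char × List Char × List String :=
  match st with
  | (m, unused, s, lst) =>
    let r := axis_names.foldl pvAInner (m, unused, ([] : List Char))
    (r.1, r.2.1, s ++ r.2.2 ++ [','], lst ++ [String.ofList r.2.2])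

def new_einsum_subscripts_to_string_and_list (subscripts : List (List String)) (scalar_output : Bool) : List String × String :=
  let num_inputs : Int := if !scalar_output then (subscripts.length : Int) - 1 else (subscripts.length : Int)
  let st := (PySem.List.slice subscripts none (some num_inputs)).foldl pvAOuter
      (PySem.Dict.empty, pvLetters, ([] : List Char), ([] : List String))
  let tensor_rep : List Char :=
    if (subscripts.length : Int) = num_inputs + 1 then
      -- 'subscripts[-1]' raises IndexError on [] and 'axis_map[axis]' raises KeyError for an
      -- output axis never seen in an input — both excluded by Pre_; defaults there
      (PySem.List.pyGetD subscripts (-1) []).foldl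
        (fun rep axis => rep ++ PySem.Dict.getD st.1 axis []) []
    else []
  -- operation_as_string[:-1] + '->' + tensor_rep  (s[:-1] over chars IS dropLast, exact)
  (st.2.2.2 ++ [String.ofList tensor_rep], String.ofList (st.2.2.1.dropLast ++ ['-', '>'] ++ tensor_rep))

-- ===== PORT B =====
-- letters[len(set(flat[:flat.index(axis)]))]: 'flat.index' raises ValueError for an output axis
-- absent from the inputs and 'letters[k]' raises IndexError past 26 distinct axes — both excluded
-- by Pre_; getD 0 / take 1 default there
def pvBLetter (flat : List String) (axis : String) : List Char :=
  let i : Int := ((PySem.List.index? flat axis).getD 0 : Nat)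
  let k := (PySem.Set.ofList (PySem.List.slice flat none (some i))).length
  (pvLetters.drop k).take 1

def new_einsum_subscripts_to_string_and_list_alt (subscripts : List (List String)) (scalar_output : Bool) : List String × String :=
  let inputs := if scalar_output then subscripts else PySem.List.slice subscripts none (some (-1))
  let flat := inputs.flatten
  let reps := inputs.map (fun axis_names => (axis_names.map (pvBLetter flat)).flatten)
  let out_rep : List Char :=
    if scalar_output then []
    else ((PySem.List.pyGetD subscripts (-1) []).map (pvBLetter flat)).flatten
  (reps.map String.ofList ++ [String.ofList out_rep],
   String.ofList (PySem.Chars.join [','] reps ++ ['-', '>'] ++ out_rep))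

-- ===== PRECONDITION & SPEC =====
-- Pre_ excludes exactly the inputs on which the Python A raises: an empty subscripts list with
-- scalar_output=False (IndexError on subscripts[-1]), more than 26 distinct axis names over the
-- inputs (IndexError on unused_chars[0]), and an output axis never appearing in an input (KeyError).
def Pre_new_einsum_subscripts_to_string_and_list (subscripts : List (List String)) (scalar_output : Bool) : Prop :=
  (PySem.List.dedup (if scalar_output then subscripts else subscripts.dropLast).flatten).length ≤ 26 ∧
  (scalar_output = false → subscripts ≠ [] ∧
    ∀ a ∈ subscripts.getLastD [], a ∈ (subscripts.dropLast).flatten)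
instance (subscripts : List (List String)) (scalar_output : Bool) : Decidable (Pre_new_einsum_subscripts_to_string_and_list subscripts scalar_output) := by unfold Pre_new_einsum_subscripts_to_string_and_list; infer_instance

def pvWitness_new_einsum_subscripts_to_string_and_list : List (List String) × Bool :=
  ([["i", "j"], ["j", "k"], ["i", "k"]], false)

def Spec_new_einsum_subscripts_to_string_and_list (subscripts : List (List String)) (scalar_output : Bool) (out : List String × String) : Prop := out = new_einsum_subscripts_to_string_and_list_alt subscripts scalar_output
instance (subscripts : List (List String)) (scalar_output : Bool) (out : List String × String) : Decidable (Spec_new_einsum_subscripts_to_string_and_list subscripts scalar_output out) := by unfold Spec_new_einsum_subscripts_to_string_and_list; infer_instance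

-- ===== CLAIM (what is proved, stated in full; the proofs are below) =====
def Claim_equal_new_einsum_subscripts_to_string_and_list : Prop := ∀ (subscripts : List (List String)) (scalar_output : Bool), Dom_new_einsum_subscripts_to_string_and_list subscripts scalar_output → Pre_new_einsum_subscripts_to_string_and_list subscripts scalar_output → Spec_new_einsum_subscripts_to_string_and_list subscripts scalar_output (new_einsum_subscripts_to_string_and_list subscripts scalar_output)

-- ===== LEMMAS AND PROOFS =====
-- model of A's dict after the axes in `ord` (first occurrences, in order) got their letters,
-- starting from letter index k
def pvRowFrom (ord : List String) (k : Nat) : List (String × List Char) :=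
  (ord.zipIdx k).map (fun p => (p.1, (pvLetters.drop p.2).take 1))

def pvMapOf (ord : List String) : PySem.Dict String (List Char) := PySem.Dict.mk (pvRowFrom ord 0)

-- A's letter of one axis, with the table of first-occurrence order `o`
def pvFmt (o : List String) (t : List String) : List Char :=
  (t.map (fun a => PySem.Dict.getD (pvMapOf o) a [])).flatten

lemma pvRowFrom_fst (ord : List String) (k : Nat) : (pvRowFrom ord k).map Prod.fst = ord := by
  simp [pvRowFrom, List.map_map, Function.comp_def]

lemma pvRowFrom_append (ord : List String) (a : String) (k : Nat) :
    pvRowFrom (ord ++ [a]) k = pvRowFrom ord k ++ [(a, (pvLetters.drop (k + ord.length)).take 1)] := by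
  simp [pvRowFrom, List.zipIdx_append]

lemma pvRowFrom_cons (b : String) (rest : List String) (k : Nat) :
    pvRowFrom (b :: rest) k = (b, (pvLetters.drop k).take 1) :: pvRowFrom rest (k + 1) := by
  simp [pvRowFrom, List.zipIdx_cons]

lemma pvFind?_rowFrom_none (ord : List String) (k : Nat) (a : String) (h : a ∉ ord) :
    (pvRowFrom ord k).find? (fun p => p.1 == a) = none := by
  induction ord generalizing k with
  | nil => rfl
  | cons b rest ih =>
    simp only [List.mem_cons, not_or] at h
    rw [pvRowFrom_cons, List.find?_cons_of_neg (by simp; exact fun e => h.1 e.symm),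
      ih (k + 1) h.2]

lemma pvFind?_rowFrom_mem (ord : List String) (k : Nat) (a : String) (h : a ∈ ord) :
    ((pvRowFrom ord k).find? (fun p => p.1 == a)).map Prod.snd
      = some ((pvLetters.drop (k + ord.idxOf a)).take 1) := by
  induction ord generalizing k with
  | nil => cases h
  | cons b rest ih =>
    by_cases hb : b = a
    · subst hb
      rw [pvRowFrom_cons, List.find?_cons_of_pos (by simp)]
      simp
    · have ha : a ∈ rest := by
        rcases List.mem_cons.1 h with h' | h' <;> [exact absurd h'.symm hb; exact h']
      rw [pvRowFrom_cons, List.find?_cons_of_neg (by simp [hb]),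
        ih (k + 1) ha, List.idxOf_cons_ne _ (by simpa using hb)]
      have harith : k + 1 + rest.idxOf a = k + (rest.idxOf a + 1) := by omega
      rw [harith]

lemma pvMapOf_get?_none (ord : List String) (a : String) (h : a ∉ ord) :
    (pvMapOf ord).get? a = none := by
  simp [pvMapOf, PySem.Dict.get?, pvFind?_rowFrom_none ord 0 a h]

lemma pvMapOf_get?_mem (ord : List String) (a : String) (h : a ∈ ord) :
    (pvMapOf ord).get? a = some ((pvLetters.drop (ord.idxOf a)).take 1) := by
  have := pvFind?_rowFrom_mem ord 0 a h
  simpa [pvMapOf, PySem.Dict.get?] using this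

lemma pvMlook (ord : List String) (a : String) :
    PySem.Dict.getD (pvMapOf ord) a []
      = if a ∈ ord then (pvLetters.drop (ord.idxOf a)).take 1 else [] := by
  by_cases h : a ∈ ord
  · simp [PySem.Dict.getD, pvMapOf_get?_mem ord a h, h]
  · simp [PySem.Dict.getD, pvMapOf_get?_none ord a h, h]

lemma pvGetD_prefix (o₁ o₂ : List String) (a : String) (h : a ∈ o₁) (hp : o₁ <+: o₂) :
    PySem.Dict.getD (pvMapOf o₂) a [] = PySem.Dict.getD (pvMapOf o₁) a [] := by
  obtain ⟨ext, rfl⟩ := hp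
  rw [pvMlook, pvMlook, if_pos h, if_pos (List.mem_append.2 (Or.inl h)),
    List.idxOf_append_of_mem h]

lemma pvInsert_fresh (l : List (String × List Char)) (a : String) (v : List Char)
    (h : a ∉ l.map Prod.fst) : (PySem.Dict.mk l).insert a v = PySem.Dict.mk (l ++ [(a, v)]) := by
  have hcont : (PySem.Dict.mk l).contains a = false := by
    simp [PySem.Dict.contains]
    intro x y hxy hxa
    subst hxa
    exact h (List.mem_map.2 ⟨(x, y), hxy, rfl⟩)
  simp [PySem.Dict.insert, hcont]

lemma pvSet_add_mem (ord : List String) (a : String) (h : a ∈ ord) : PySem.Set.add ord a = ord := by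
  simp [PySem.Set.add, h]

lemma pvSet_add_not_mem (ord : List String) (a : String) (h : a ∉ ord) :
    PySem.Set.add ord a = ord ++ [a] := by
  simp [PySem.Set.add, h]

lemma pvAInner_step (ord : List String) (rep : List Char) (a : String) :
    pvAInner (pvMapOf ord, pvLetters.drop ord.length, rep) a
      = (pvMapOf (PySem.Set.add ord a), pvLetters.drop (PySem.Set.add ord a).length,
         rep ++ PySem.Dict.getD (pvMapOf (PySem.Set.add ord a)) a []) := by
  by_cases h : a ∈ ord
  · rw [pvSet_add_mem ord a h]
    simp [pvAInner, pvMapOf_get?_mem ord a h, PySem.Dict.getD]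
  · rw [pvSet_add_not_mem ord a h]
    have hfresh : (pvMapOf ord).insert a ((pvLetters.drop ord.length).take 1)
        = pvMapOf (ord ++ [a]) := by
      rw [pvMapOf, pvMapOf, pvRowFrom_append, Nat.zero_add]
      exact pvInsert_fresh _ a _ (by rw [pvRowFrom_fst]; exact h)
    have hidx : (ord ++ [a]).idxOf a = ord.length := by simp [List.idxOf_append, h]
    simp [pvAInner, pvMapOf_get?_none ord a h, hfresh, List.drop_drop,
      pvMlook, List.mem_append, hidx]

lemma pvPrefix_update (s : List String) (xs : List String) : s <+: PySem.Set.update s xs :=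
  ⟨_, (PySem.Set.update_eq_append_filter s xs).symm⟩

lemma pvMem_update (s : List String) (xs : List String) (a : String) (h : a ∈ xs) :
    a ∈ PySem.Set.update s xs := by
  rw [PySem.Set.update_eq_append_filter]
  by_cases hs : a ∈ s
  · exact List.mem_append_left _ hs
  · refine List.mem_append_right _ ?_
    refine List.mem_filter.2 ⟨by rw [PySem.Set.mem_ofList]; exact h, ?_⟩
    simp [hs]

lemma pvFmt_congr (o₁ o₂ : List String) (t : List String)
    (hm : ∀ a ∈ t, a ∈ o₁) (hp : o₁ <+: o₂) : pvFmt o₂ t = pvFmt o₁ t := by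
  unfold pvFmt
  congr 1
  exact List.map_congr_left fun a ha => pvGetD_prefix _ _ _ (hm a ha) hp

lemma pvInner_fold (t : List String) : ∀ (ord : List String) (rep : List Char),
    t.foldl pvAInner (pvMapOf ord, pvLetters.drop ord.length, rep)
      = (pvMapOf (PySem.Set.update ord t), pvLetters.drop (PySem.Set.update ord t).length,
         rep ++ pvFmt (PySem.Set.update ord t) t) := by
  induction t with
  | nil => intro ord rep; simp [pvFmt, PySem.Set.update]
  | cons a rest ih =>
    intro ord rep
    rw [List.foldl_cons, pvAInner_step, ih, PySem.Set.update_cons]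
    have hc : PySem.Dict.getD (pvMapOf (PySem.Set.add ord a)) a []
        = PySem.Dict.getD (pvMapOf (PySem.Set.update (PySem.Set.add ord a) rest)) a [] :=
      (pvGetD_prefix _ _ _ (by simp [PySem.Set.mem_add]) (pvPrefix_update _ rest)).symm
    simp [pvFmt, List.append_assoc, hc]

lemma pvPrefix_foldl (ts : List (List String)) : ∀ ord : List String,
    ord <+: ts.foldl PySem.Set.update ord := by
  induction ts with
  | nil => intro ord; exact List.prefix_refl ord
  | cons t rest ih =>
    intro ord
    exact (pvPrefix_update ord t).trans (ih (PySem.Set.update ord t))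

lemma pvOuter_fold (ts : List (List String)) : ∀ (ord : List String) (s : List Char) (lst : List String),
    ts.foldl pvAOuter (pvMapOf ord, pvLetters.drop ord.length, s, lst)
      = (pvMapOf (ts.foldl PySem.Set.update ord),
         pvLetters.drop (ts.foldl PySem.Set.update ord).length,
         s ++ (ts.map (fun t => pvFmt (ts.foldl PySem.Set.update ord) t ++ [','])).flatten,
         lst ++ ts.map (fun t => String.ofList (pvFmt (ts.foldl PySem.Set.update ord) t))) := by
  induction ts with
  | nil => intro ord s lst; simp
  | cons t rest ih =>
    intro ord s lst
    rw [List.foldl_cons]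
    have hstep : pvAOuter (pvMapOf ord, pvLetters.drop ord.length, s, lst) t
        = (pvMapOf (PySem.Set.update ord t), pvLetters.drop (PySem.Set.update ord t).length,
           s ++ pvFmt (PySem.Set.update ord t) t ++ [','],
           lst ++ [String.ofList (pvFmt (PySem.Set.update ord t) t)]) := by
      simp [pvAOuter, pvInner_fold t ord]
    rw [hstep, ih]
    have hfmt : pvFmt (rest.foldl PySem.Set.update (PySem.Set.update ord t)) t
        = pvFmt (PySem.Set.update ord t) t :=
      pvFmt_congr _ _ t (fun a ha => pvMem_update ord t a ha) (pvPrefix_foldl rest _)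
    simp [List.foldl_cons, hfmt, List.append_assoc]

lemma pvFoldl_update_flatten (ts : List (List String)) (ord : List String) :
    ts.foldl PySem.Set.update ord = PySem.Set.update ord ts.flatten := by
  show ts.foldl PySem.Set.update ord = ts.flatten.foldl PySem.Set.add ord
  rw [List.foldl_flatten]
  rfl

lemma pvJoinComma (rs : List (List Char)) :
    ((rs.map (fun r => r ++ [','])).flatten).dropLast = PySem.Chars.join [','] rs := by
  induction rs with
  | nil => simp [PySem.Chars.join_nil]
  | cons r rest ih =>
    cases rest with
    | nil => simp [PySem.Chars.join_singleton]
    | cons r' rs' =>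
      rw [List.map_cons, List.flatten_cons,
        List.dropLast_append_of_ne_nil (by simp), ih, PySem.Chars.join_cons_cons]

lemma pvOuter_fold' (ts : List (List String)) :
    ts.foldl pvAOuter (PySem.Dict.empty, pvLetters, ([] : List Char), ([] : List String))
      = (pvMapOf (PySem.List.dedup ts.flatten),
         pvLetters.drop (PySem.List.dedup ts.flatten).length,
         (ts.map (fun t => pvFmt (PySem.List.dedup ts.flatten) t ++ [','])).flatten,
         ts.map (fun t => String.ofList (pvFmt (PySem.List.dedup ts.flatten) t))) := by
  have hOF : ts.foldl PySem.Set.update [] = PySem.List.dedup ts.flatten := by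
    rw [pvFoldl_update_flatten, PySem.Set.update_nil_left, PySem.List.dedup_eq_ofList]
  have h := pvOuter_fold ts [] [] []
  rw [hOF] at h
  have e1 : (PySem.Dict.empty : PySem.Dict String (List Char)) = pvMapOf [] := rfl
  have e2 : pvLetters = pvLetters.drop ([] : List String).length := rfl
  rw [e1, e2]
  simpa using h

lemma pvFmt_flatMap (o : List String) (t : List String) :
    t.flatMap (fun a => PySem.Dict.getD (pvMapOf o) a []) = pvFmt o t := by
  rw [List.flatMap_def]; rfl

lemma pvIdxOf_append_cons_self (l1 l2 : List String) (a : String) (h : a ∉ l1) :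
    (l1 ++ a :: l2).idxOf a = l1.length := by
  induction l1 with
  | nil => simp
  | cons b rest ih =>
    simp only [List.mem_cons, not_or] at h
    rw [List.cons_append, List.idxOf_cons_ne _ (by simpa using fun e => h.1 e.symm),
      ih h.2, List.length_cons]

-- A's letter of axis a (via the first-occurrence table) equals B's recomputed letter
lemma pvBLetter_eq (flat : List String) (a : String) (h : a ∈ flat) :
    pvBLetter flat a = PySem.Dict.getD (pvMapOf (PySem.List.dedup flat)) a [] := by
  obtain ⟨k, hk⟩ := Option.isSome_iff_exists.mp ((PySem.List.index?_isSome_iff flat a).mpr h)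
  obtain ⟨pre, suf, hflat, hlen, hpre⟩ := (PySem.List.index?_eq_some_iff flat a k).mp hk
  have hslice : PySem.List.slice flat none (some ((k : Nat) : Int)) = pre := by
    rw [PySem.List.slice_to_natCast, hflat, ← hlen, List.take_left]
  have hset : PySem.Set.ofList flat = PySem.Set.ofList pre ++ a ::
      ((PySem.Set.ofList suf).filter (fun y => !(PySem.Set.contains (PySem.Set.ofList pre ++ [a]) y))) := by
    have h1 : PySem.Set.ofList flat = PySem.Set.update (PySem.Set.ofList pre) (a :: suf) := by
      rw [hflat]
      exact PySem.Set.ofList_append pre (a :: suf)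
    have h2 : PySem.Set.add (PySem.Set.ofList pre) a = PySem.Set.ofList pre ++ [a] :=
      pvSet_add_not_mem _ a (by rw [PySem.Set.mem_ofList]; exact hpre)
    rw [h1, PySem.Set.update_cons, h2, PySem.Set.update_eq_append_filter]
    simp
  have hidx : (PySem.List.dedup flat).idxOf a = (PySem.Set.ofList pre).length := by
    rw [PySem.List.dedup_eq_ofList, hset]
    have hnotpre : a ∉ PySem.Set.ofList pre := by rw [PySem.Set.mem_ofList]; exact hpre
    exact pvIdxOf_append_cons_self _ _ _ hnotpre
  have hmem : a ∈ PySem.List.dedup flat := (PySem.List.mem_dedup _ _).mpr h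
  rw [pvMlook, if_pos hmem, hidx]
  unfold pvBLetter
  rw [hk]
  simp only [Option.getD_some, hslice]

lemma pvFmt_eq_map_pvBLetter (flat : List String) (t : List String) (hm : ∀ a ∈ t, a ∈ flat) :
    (t.map (pvBLetter flat)).flatten = pvFmt (PySem.List.dedup flat) t := by
  unfold pvFmt
  congr 1
  exact List.map_congr_left fun a ha => pvBLetter_eq flat a (hm a ha)

lemma pvListSide (ts : List (List String)) (OF : List String) (last : List Char) :
    ts.map (fun t => String.ofList (pvFmt OF t)) ++ [String.ofList last]
      = (ts.map (pvFmt OF)).map String.ofList ++ [String.ofList last] := by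
  rw [List.map_map]; rfl

lemma pvStrSide (ts : List (List String)) (OF : List String) (last : List Char) :
    String.ofList (((ts.map (fun t => pvFmt OF t ++ [','])).flatten).dropLast
        ++ ['-', '>'] ++ last)
      = String.ofList (PySem.Chars.join [','] (ts.map (pvFmt OF)) ++ ['-', '>'] ++ last) := by
  rw [← pvJoinComma (ts.map (pvFmt OF)), List.map_map]
  rfl

-- ===== VERDICT (by name: the statement is the Claim_ definition above) =====
theorem new_einsum_subscripts_to_string_and_list_spec : Claim_equal_new_einsum_subscripts_to_string_and_list := by
  intro subscripts scalar_output _ hpre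
  unfold Spec_new_einsum_subscripts_to_string_and_list
  cases scalar_output with
  | true =>
    simp only [new_einsum_subscripts_to_string_and_list,
      new_einsum_subscripts_to_string_and_list_alt, Bool.not_true, Bool.false_eq_true,
      if_false, if_true, PySem.List.slice_to_natCast, List.take_length]
    rw [if_neg (by omega)]
    rw [pvOuter_fold']
    have hreps : ∀ t ∈ subscripts, (t.map (pvBLetter subscripts.flatten)).flatten
        = pvFmt (PySem.List.dedup subscripts.flatten) t := fun t ht =>
      pvFmt_eq_map_pvBLetter _ t (fun a ha => List.mem_flatten.mpr ⟨t, ht, ha⟩)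
    rw [List.map_congr_left hreps]
    exact congrArg₂ Prod.mk (pvListSide _ _ _) (pvStrSide _ _ _)
  | false =>
    obtain ⟨-, h2⟩ := hpre
    obtain ⟨hne, hout⟩ := h2 rfl
    cases subscripts with
    | nil => exact absurd rfl hne
    | cons hd tl =>
      have hslice : PySem.List.slice (hd :: tl) none (some ((((hd :: tl).length : Nat) : Int) - 1))
          = (hd :: tl).dropLast := by
        have h1 : ((((hd :: tl).length : Nat) : Int) - 1) = ((tl.length : Nat) : Int) := by
          simp
        rw [h1, PySem.List.slice_to_natCast, List.dropLast_eq_take]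
        simp
      simp only [new_einsum_subscripts_to_string_and_list,
        new_einsum_subscripts_to_string_and_list_alt, Bool.not_false, Bool.false_eq_true,
        if_false, if_true, PySem.List.slice_to_neg_one, hslice]
      rw [if_pos (by omega)]
      rw [pvOuter_fold']
      rw [PySem.List.foldl_append_eq_flatMap, List.nil_append, pvFmt_flatMap]
      have hlast : PySem.List.pyGetD (hd :: tl) (-1) ([] : List String)
          = (hd :: tl).getLastD [] := by
        simp [PySem.List.pyGetD, PySem.List.pyGet?, PySem.List.pyIdx?, List.getLastD_eq_getLast?,
          List.getLast?_eq_getElem?]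
      have hreps : ∀ t ∈ (hd :: tl).dropLast,
          (t.map (pvBLetter ((hd :: tl).dropLast).flatten)).flatten
            = pvFmt (PySem.List.dedup ((hd :: tl).dropLast).flatten) t := fun t ht =>
        pvFmt_eq_map_pvBLetter _ t (fun a ha => List.mem_flatten.mpr ⟨t, ht, ha⟩)
      have houtfmt : ((PySem.List.pyGetD (hd :: tl) (-1) []).map
            (pvBLetter ((hd :: tl).dropLast).flatten)).flatten
          = pvFmt (PySem.List.dedup ((hd :: tl).dropLast).flatten)
              (PySem.List.pyGetD (hd :: tl) (-1) []) := by
        refine pvFmt_eq_map_pvBLetter _ _ (fun a ha => ?_)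
        rw [hlast] at ha
        exact hout a ha
      rw [List.map_congr_left hreps, houtfmt, hlast]
      exact congrArg₂ Prod.mk (pvListSide _ _ _) (pvStrSide _ _ _)
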